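-- pv_equiv track=rewrite | github.com/RahulEdward/computer-vision | intelligent_automation_engine/parallel/execution_planner.py | _create_parallel_groups
-- ===== SOURCE A (Python) =====
-- from typing import List, Dict, Optional, Set, Any, Tuple, Callable, Union
--
-- def _create_parallel_groups(task_ids: List[str], max_parallel: int) -> List[List[str]]:
--     """Create parallel groups from task IDs"""
--     if max_parallel <= 0 or max_parallel >= len(task_ids):
--         return [task_ids]  # Single group with all tasks
--
--     # Split tasks into groups
--     groups = []
--     group_size = len(task_ids) // max_parallel
--     remainder = len(task_ids) % max_parallel
--
--     start_idx = 0
--     for i in range(max_parallel):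
--         # Add one extra task to first 'remainder' groups
--         current_group_size = group_size + (1 if i < remainder else 0)
--         end_idx = start_idx + current_group_size
--
--         if start_idx < len(task_ids):
--             groups.append(task_ids[start_idx:end_idx])
--             start_idx = end_idx
--
--     return [group for group in groups if group]  # Remove empty groups
-- ===== SOURCE B (Python) =====
-- def _create_parallel_groups(task_ids, max_parallel):
--     """Create parallel groups from task IDs (closed-form slice boundaries)."""
--     if max_parallel <= 0 or max_parallel >= len(task_ids):
--         return [task_ids]
--     base = len(task_ids) // max_parallel
--     rem = len(task_ids) % max_parallel
--     return [task_ids[i * base + min(i, rem):(i + 1) * base + min(i + 1, rem)]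
--             for i in range(max_parallel)]
-- ===== Notes on version B (the rewrite author's own statement) =====
-- stated objective: simpler
-- what changed: Replaces the running start_idx accumulator loop (with its dead empty-group filter and start_idx<len guard) by a single comprehension computing each group's slice boundaries in closed form from i (i*base+min(i,rem)).
import Mathlib
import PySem

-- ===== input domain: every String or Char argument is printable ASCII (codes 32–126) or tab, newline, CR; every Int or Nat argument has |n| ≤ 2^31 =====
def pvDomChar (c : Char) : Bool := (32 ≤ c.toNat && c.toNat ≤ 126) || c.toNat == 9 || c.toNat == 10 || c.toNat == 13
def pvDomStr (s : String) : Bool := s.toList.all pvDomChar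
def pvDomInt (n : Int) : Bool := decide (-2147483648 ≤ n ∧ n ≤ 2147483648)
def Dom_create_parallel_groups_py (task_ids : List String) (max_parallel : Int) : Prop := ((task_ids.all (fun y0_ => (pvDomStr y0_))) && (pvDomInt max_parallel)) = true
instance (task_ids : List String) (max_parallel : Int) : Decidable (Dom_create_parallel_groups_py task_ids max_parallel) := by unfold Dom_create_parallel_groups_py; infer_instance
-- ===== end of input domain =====

-- B replaces A's running start_idx loop by closed-form slice boundaries; objective: simpler.

-- ===== PORT A =====
-- one loop iteration of A: state = (groups, start_idx)
def pvStepA (task_ids : List String) (group_size remainder : Int)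
    (acc : List (List String) × Int) (i : Int) : List (List String) × Int :=
  let current_group_size := group_size + (if i < remainder then 1 else 0)
  let end_idx := acc.2 + current_group_size
  if acc.2 < (task_ids.length : Int) then
    (acc.1 ++ [PySem.List.slice task_ids (some acc.2) (some end_idx)], end_idx)
  else acc

def create_parallel_groups_py (task_ids : List String) (max_parallel : Int) : List (List String) :=
  if max_parallel ≤ 0 ∨ max_parallel ≥ (task_ids.length : Int) then
    [task_ids]
  else
    let group_size := PySem.Int.floordiv (task_ids.length : Int) max_parallel
    let remainder := PySem.Int.mod (task_ids.length : Int) max_parallel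
    let st := (PySem.List.pyRange 0 max_parallel 1).foldl
      (pvStepA task_ids group_size remainder) ([], 0)
    st.1.filter (fun g => !g.isEmpty)

-- ===== PORT B =====
def create_parallel_groups_py_alt (task_ids : List String) (max_parallel : Int) : List (List String) :=
  if max_parallel ≤ 0 ∨ max_parallel ≥ (task_ids.length : Int) then
    [task_ids]
  else
    let base := PySem.Int.floordiv (task_ids.length : Int) max_parallel
    let rem := PySem.Int.mod (task_ids.length : Int) max_parallel
    (PySem.List.pyRange 0 max_parallel 1).map (fun i =>
      PySem.List.slice task_ids (some (i * base + min i rem))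
        (some ((i + 1) * base + min (i + 1) rem)))

-- ===== PRECONDITION & SPEC =====
def Spec_create_parallel_groups_py (task_ids : List String) (max_parallel : Int) (out : List (List String)) : Prop := out = create_parallel_groups_py_alt task_ids max_parallel
instance (task_ids : List String) (max_parallel : Int) (out : List (List String)) : Decidable (Spec_create_parallel_groups_py task_ids max_parallel out) := by unfold Spec_create_parallel_groups_py; infer_instance

-- ===== CLAIM (what is proved, stated in full; the proofs are below) =====
def Claim_equal_create_parallel_groups_py : Prop := ∀ (task_ids : List String) (max_parallel : Int), Dom_create_parallel_groups_py task_ids max_parallel → Spec_create_parallel_groups_py task_ids max_parallel (create_parallel_groups_py task_ids max_parallel)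

-- ===== LEMMAS AND PROOFS =====

-- boundary of group i: start of group i (in Nat)
def pvB (b r i : Nat) : Nat := i * b + min i r

theorem pvB_mono {b r : Nat} (hb : 1 ≤ b) {i j : Nat} (h : i < j) :
    pvB b r i < pvB b r j := by
  unfold pvB
  have h1 : i * b + b ≤ j * b := by
    have := Nat.mul_le_mul_right b (Nat.succ_le_of_lt h)
    simpa [Nat.succ_mul] using this
  have h2 : min i r ≤ min j r := by omega
  omega

theorem pvB_succ (b r i : Nat) :
    pvB b r (i + 1) = pvB b r i + (b + if i < r then 1 else 0) := by
  unfold pvB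
  by_cases h : i < r <;> simp [h, Nat.succ_mul] <;> omega

-- the loop of A, run from index j with start = pvB j, appends exactly the slices of B
theorem pvLoopA (xs : List String) (b r k : Nat) (hb : 1 ≤ b)
    (hr : r < k) (hsum : pvB b r k = xs.length) :
    ∀ (j : Nat) (gs : List (List String)), j ≤ k →
      (PySem.List.pyRange (j : Int) (k : Int) 1).foldl
          (pvStepA xs (b : Int) (r : Int)) (gs, ((pvB b r j : Nat) : Int))
        = (gs ++ (List.range' j (k - j)).map (fun i =>
            PySem.List.slice xs (some ((pvB b r i : Nat) : Int)) (some ((pvB b r (i + 1) : Nat) : Int))),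
           ((pvB b r k : Nat) : Int)) := by
  intro j gs hj
  induction hd : k - j generalizing j gs with
  | zero =>
    have hjk : j = k := by omega
    subst hjk
    rw [PySem.List.pyRange_one_eq_nil (by omega)]
    simp
  | succ m ih =>
    have hjk : j < k := by omega
    rw [PySem.List.pyRange_one_cons (by exact_mod_cast hjk)]
    simp only [List.foldl_cons]
    have hendN : pvB b r j + (b + if j < r then 1 else 0) = pvB b r (j + 1) :=
      (pvB_succ b r j).symm
    have hlt : pvB b r j < xs.length := by
      rw [← hsum]; exact pvB_mono hb hjk
    have hstep : pvStepA xs (b : Int) (r : Int) (gs, ((pvB b r j : Nat) : Int)) (j : Int)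
        = (gs ++ [PySem.List.slice xs (some ((pvB b r j : Nat) : Int)) (some ((pvB b r (j + 1) : Nat) : Int))],
           ((pvB b r (j + 1) : Nat) : Int)) := by
      have hend : ((pvB b r j : Nat) : Int) + ((b : Int) + if (j : Int) < (r : Int) then 1 else 0)
          = ((pvB b r (j + 1) : Nat) : Int) := by
        rw [← hendN]
        by_cases h : j < r
        · rw [if_pos (by exact_mod_cast h)]; push_cast [h]; ring
        · rw [if_neg (by exact_mod_cast h)]; push_cast [h]; ring
      unfold pvStepA
      dsimp only
      rw [hend]
      exact if_pos (by exact_mod_cast hlt)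
    rw [hstep]
    have := ih (j + 1) (gs ++ [PySem.List.slice xs (some ((pvB b r j : Nat) : Int)) (some ((pvB b r (j + 1) : Nat) : Int))]) (by omega) (by omega)
    push_cast at this
    rw [this]
    rw [show List.range' j (m + 1) = j :: List.range' (j + 1) m from rfl, List.map_cons]
    simp

theorem create_parallel_groups_eq (task_ids : List String) (max_parallel : Int) :
    create_parallel_groups_py task_ids max_parallel
      = create_parallel_groups_py_alt task_ids max_parallel := by
  unfold create_parallel_groups_py create_parallel_groups_py_alt
  by_cases hg : max_parallel ≤ 0 ∨ max_parallel ≥ (task_ids.length : Int)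
  · simp [hg]
  · simp only [if_neg hg]
    rw [not_or] at hg
    obtain ⟨hg1, hg2⟩ := hg
    have h0 : 0 < max_parallel := by omega
    have hlen : max_parallel < (task_ids.length : Int) := by simpa using hg2
    -- k = max_parallel as a Nat, 1 ≤ k < length
    set n := task_ids.length with hn
    obtain ⟨k, hk⟩ : ∃ k : Nat, max_parallel = (k : Int) :=
      ⟨max_parallel.toNat, (Int.toNat_of_nonneg (by omega)).symm⟩
    subst hk
    have hk1 : 1 ≤ k := by exact_mod_cast h0
    have hkn : k < n := by exact_mod_cast hlen
    set b := n / k with hb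
    set r := n % k with hr
    have hfd : PySem.Int.floordiv (n : Int) (k : Int) = ((b : Nat) : Int) :=
      PySem.Int.floordiv_natCast n k
    have hmd : PySem.Int.mod (n : Int) (k : Int) = ((r : Nat) : Int) :=
      PySem.Int.mod_natCast n k
    have hb1 : 1 ≤ b := (Nat.one_le_div_iff (by omega)).2 (by omega)
    have hrk : r < k := Nat.mod_lt _ (by omega)
    have hsum : pvB b r k = n := by
      unfold pvB
      have := Nat.div_add_mod n k
      have hmin : min k r = r := by omega
      rw [hmin, hb, hr]
      omega
    simp only [hfd, hmd]
    have hloop := pvLoopA task_ids b r k hb1 hrk (by rw [hsum]) 0 [] (by omega)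
    have h00 : ((pvB b r 0 : Nat) : Int) = 0 := by unfold pvB; simp
    rw [h00] at hloop
    norm_num at hloop
    rw [hloop]
    -- filter is the identity: every slice is nonempty
    rw [List.filter_eq_self.2 ?nonempty]
    case nonempty =>
      intro g hg
      simp only [List.mem_map] at hg
      obtain ⟨i, hi, hgi⟩ := hg
      have hik : i < k := by
        have := List.mem_range'.1 hi; omega
      have hlt : pvB b r i < n := by rw [← hsum]; exact pvB_mono hb1 hik
      have hstep : pvB b r i < pvB b r (i + 1) := pvB_mono hb1 (by omega)
      rw [← hgi, PySem.List.slice_natCast]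
      simp only [Bool.not_true, Bool.not_eq_eq_eq_not, List.isEmpty_eq_false_iff]
      apply List.ne_nil_of_length_pos
      simp only [List.length_take, List.length_drop]
      omega
    -- align B's map over pyRange with A's map over range'
    rw [PySem.List.pyRange_one]
    rw [show ((k : Int) - 0).toNat = k by simp, List.range_eq_range', List.map_map]
    apply List.map_congr_left
    intro i hi
    have hik : i < k := by
      have := List.mem_range'.1 hi; omega
    simp only [Function.comp]
    rw [show (0 : Int) + (i : Int) = (i : Int) by ring]
    congr 1
    · congr 1
      unfold pvB
      push_cast
      ring
    · congr 1
      rw [show (i : Int) + 1 = ((i + 1 : Nat) : Int) by push_cast; ring]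
      unfold pvB
      push_cast
      ring

-- ===== VERDICT (by name: the statement is the Claim_ definition above) =====
theorem create_parallel_groups_py_spec : Claim_equal_create_parallel_groups_py := by
  intro task_ids max_parallel _
  unfold Spec_create_parallel_groups_py
  exact create_parallel_groups_eq task_ids max_parallel
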